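-- pv_equiv track=rewrite | github.com/akashdeep3194/Scaler | d22 & d23/Amazing Subarrays.py | solve
-- ===== SOURCE A (Python) =====
-- def solve(A):
--     n = len(A)
--     ans = 0
--     for i, ele in enumerate(A):
--         if ele in ('a','e','i','o','u','A','E','I','O','U'):
--             ans += (n-i)
--             ans = ans%10003
--     return ans
-- ===== SOURCE B (Python) =====
-- def solve(A):
--     v = 0
--     ans = 0
--     for ch in A:
--         if ch in 'aeiouAEIOU':
--             v += 1
--         ans = (ans + v) % 10003
--     return ans
-- ===== Notes on version B (the rewrite author's own statement) =====
-- stated objective: faster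
-- what changed: Counts subarrays by ending index: maintains a running count v of vowels seen so far and adds v (mod 10003) at every character, instead of A's enumerate loop adding (n-i) at each vowel position.
import Mathlib
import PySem

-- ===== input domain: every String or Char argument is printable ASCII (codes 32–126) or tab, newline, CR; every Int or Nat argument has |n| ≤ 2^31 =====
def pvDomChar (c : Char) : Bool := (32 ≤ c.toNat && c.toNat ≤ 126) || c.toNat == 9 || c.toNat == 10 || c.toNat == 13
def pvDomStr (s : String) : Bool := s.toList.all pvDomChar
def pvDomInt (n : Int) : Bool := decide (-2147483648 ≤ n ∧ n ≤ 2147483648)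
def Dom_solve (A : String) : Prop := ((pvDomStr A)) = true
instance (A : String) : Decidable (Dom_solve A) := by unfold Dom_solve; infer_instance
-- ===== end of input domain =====

-- B counts subarrays by ending index with a running vowel counter instead of A's
-- per-vowel (n-i) contributions; same O(n) cost, different decomposition.

-- ===== PORT A =====
def pvVowelA (c : Char) : Bool :=
  decide (c ∈ ['a','e','i','o','u','A','E','I','O','U'])

def solveStepA (n : Int) (ans : Int) (p : Int × Char) : Int :=
  if pvVowelA p.2 then (ans + (n - p.1)) % 10003 else ans

def solve (A : String) : Int :=
  let n : Int := PySem.Str.len A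
  (PySem.List.enumerate A.toList).foldl (solveStepA n) 0

-- ===== PORT B =====
def pvVowelB (c : Char) : Bool := decide (c ∈ "aeiouAEIOU".toList)

def solveStepB (st : Int × Int) (c : Char) : Int × Int :=
  let v := if pvVowelB c then st.1 + 1 else st.1
  (v, (st.2 + v) % 10003)

def solve_alt (A : String) : Int :=
  (A.toList.foldl solveStepB (0, 0)).2

-- ===== PRECONDITION & SPEC =====
def Spec_solve (A : String) (out : Int) : Prop := out = solve_alt A
instance (A : String) (out : Int) : Decidable (Spec_solve A out) := by unfold Spec_solve; infer_instance

-- ===== CLAIM (what is proved, stated in full; the proofs are below) =====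
def Claim_equal_solve : Prop := ∀ (A : String), Dom_solve A → Spec_solve A (solve A)

-- ===== LEMMAS AND PROOFS =====

-- A's total contribution: Σ over vowel positions of m - offset.
def sumA : Int → List Char → Int
  | _, [] => 0
  | m, c :: tl => (if pvVowelA c then m else 0) + sumA (m - 1) tl

-- B's total contribution: Σ over positions of the running vowel count.
def sumB : Int → List Char → Int
  | _, [] => 0
  | v, c :: tl =>
      let v' := v + (if pvVowelB c then 1 else 0)
      v' + sumB v' tl

def cnt (l : List Char) : Int :=
  (l.countP pvVowelB : Int)

theorem vowel_eq (c : Char) : pvVowelA c = pvVowelB c := by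
  simp [pvVowelA, pvVowelB]

theorem foldA_inv (n : Int) (l : List Char) :
    ∀ (i ans : Int), 0 ≤ ans → ans < 10003 →
      (PySem.List.enumerate l i).foldl (solveStepA n) ans = (ans + sumA (n - i) l) % 10003 := by
  induction l with
  | nil =>
      intro i ans h0 h1
      simp [PySem.List.enumerate_nil, sumA, Int.emod_eq_of_lt h0 h1]
  | cons c tl ih =>
      intro i ans h0 h1
      rw [PySem.List.enumerate_cons, List.foldl_cons]
      by_cases hv : pvVowelA c
      · simp only [solveStepA, hv, if_true]
        rw [ih (i + 1) ((ans + (n - i)) % 10003)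
              (Int.emod_nonneg _ (by norm_num)) (Int.emod_lt_of_pos _ (by norm_num)),
            Int.emod_add_emod, sumA, hv]
        have h2 : n - (i + 1) = n - i - 1 := by ring
        rw [h2]
        simp only [if_true]
        congr 1
        ring
      · simp only [solveStepA, hv, Bool.false_eq_true, if_false]
        rw [ih (i + 1) ans h0 h1, sumA]
        simp only [hv, Bool.false_eq_true, if_false]
        have h2 : n - (i + 1) = n - i - 1 := by ring
        rw [h2, zero_add]

theorem foldB_inv (l : List Char) :
    ∀ (v ans : Int), 0 ≤ ans → ans < 10003 →
      l.foldl solveStepB (v, ans) = (v + cnt l, (ans + sumB v l) % 10003) := by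
  induction l with
  | nil =>
      intro v ans h0 h1
      simp [sumB, cnt, Int.emod_eq_of_lt h0 h1]
  | cons c tl ih =>
      intro v ans h0 h1
      simp only [List.foldl_cons, solveStepB]
      rw [ih _ _ (Int.emod_nonneg _ (by norm_num)) (Int.emod_lt_of_pos _ (by norm_num)),
          Prod.mk.injEq]
      constructor
      · by_cases hv : pvVowelB c <;> simp [cnt, hv] <;> ring
      · rw [Int.emod_add_emod, sumB]
        by_cases hv : pvVowelB c <;>
          simp only [hv, if_true, Bool.false_eq_true, if_false] <;>
          (congr 1; ring)

-- shift lemma: starting counter v adds v per remaining position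
theorem sumB_shift (l : List Char) : ∀ (v : Int), sumB v l = v * l.length + sumB 0 l := by
  induction l with
  | nil => intro v; simp [sumB]
  | cons c tl ih =>
      intro v
      by_cases hv : pvVowelB c <;>
        simp only [sumB, hv, if_true, Bool.false_eq_true, if_false, zero_add, add_zero]
      · rw [ih (v + 1), ih 1]; push_cast [List.length_cons]; ring
      · rw [ih v, ih 0]; push_cast [List.length_cons]; ring

-- key identity: summing (len - i) over vowel positions = summing the prefix vowel count
theorem sumA_eq_sumB (l : List Char) : sumA (l.length) l = sumB 0 l := by
  induction l with
  | nil => simp [sumA, sumB]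
  | cons c tl ih =>
      have hlen : ((c :: tl).length : Int) - 1 = (tl.length : Int) := by
        simp [List.length_cons]
      by_cases hv : pvVowelB c
      · simp only [sumA, sumB, vowel_eq c, hv, if_true, zero_add]
        rw [hlen, sumB_shift tl 1, ← ih]
        push_cast [List.length_cons]; ring
      · simp only [sumA, sumB, vowel_eq c, hv, Bool.false_eq_true, if_false, zero_add, add_zero]
        rw [hlen, ih]

-- ===== VERDICT (by name: the statement is the Claim_ definition above) =====
theorem solve_spec : Claim_equal_solve := by
  intro A _
  unfold Spec_solve solve solve_alt
  rw [foldA_inv _ _ 0 0 (by norm_num) (by norm_num),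
      foldB_inv _ 0 0 (by norm_num) (by norm_num)]
  have h : (PySem.Str.len A) - 0 = ((A.toList.length : Int)) := by
    simp [PySem.Str.len_eq]
  rw [h, sumA_eq_sumB]
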